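-- pv_equiv track=rewrite | github.com/ivlabs-dev/tf-docs | src/tfdocs/utils.py | count_blocks
-- ===== SOURCE A (Python) =====
-- def count_blocks(data):
--     s = "".join(data) if isinstance(data, list) else data
--     opens = {"{": "}", "(": ")", "[": "]"}
--     closes = {v: k for k, v in opens.items()}
--     stack = []
--
--     in_string = False
--     esc = False
--
--     for ch in s:
--         if ch == '"' and not esc:
--             in_string = not in_string
--         esc = (ch == "\\") and not esc
--         if in_string:
--             continue
--
--         if ch in opens:
--             stack.append(ch)
--         elif ch in closes:
--             if not stack or stack[-1] != closes[ch]: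
--                 return False  # early exit on mismatch
--             stack.pop()
--
--     return not stack
-- ===== SOURCE B (Python) =====
-- def count_blocks(data):
--     s = "".join(data) if isinstance(data, list) else data
--     # Pass 1: lex away string literals, keeping only bracket characters.
--     tokens = []
--     in_string = False
--     esc = False
--     for ch in s:
--         if ch == '"' and not esc:
--             in_string = not in_string
--         esc = (ch == "\\") and not esc
--         if not in_string and ch in "{}()[]":
--             tokens.append(ch)
--     # Pass 2: plain stack matcher over the bracket tokens.
--     pair = {"}": "{", ")": "(", "]": "["}
--     stack = []
--     for t in tokens:
--         if t in pair:
--             if not stack or stack[-1] != pair[t]: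
--                 return False
--             stack.pop()
--         else:
--             stack.append(t)
--     return not stack
-- ===== Notes on version B (the rewrite author's own statement) =====
-- stated objective: alternative
-- what changed: Splits A's single fused loop into two passes: a lexer pass that runs the string/escape state machine and emits only the bracket characters, followed by a pure stack matcher over that token list with no string-literal logic.
import Mathlib
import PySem

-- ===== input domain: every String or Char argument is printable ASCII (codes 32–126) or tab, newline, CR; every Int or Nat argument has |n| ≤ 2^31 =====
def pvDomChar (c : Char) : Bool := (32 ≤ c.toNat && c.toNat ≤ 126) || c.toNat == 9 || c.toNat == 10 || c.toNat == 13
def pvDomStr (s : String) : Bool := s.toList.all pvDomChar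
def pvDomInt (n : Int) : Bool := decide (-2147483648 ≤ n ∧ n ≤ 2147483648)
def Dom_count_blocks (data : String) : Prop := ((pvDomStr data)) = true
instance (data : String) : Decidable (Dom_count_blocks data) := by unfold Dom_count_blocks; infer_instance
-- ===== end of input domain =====

-- B rewrites A's single fused loop as two passes: a lexer that strips string
-- literals and keeps only bracket characters, then a pure stack matcher.

-- ===== PORT A =====
-- closes[ch] for the three closing brackets (A's dict lookup)
def pvClosesOf (ch : Char) : Char :=
  if ch = '}' then '{' else if ch = ')' then '(' else '['

-- A's single loop: state = (stack, in_string, esc); early return False on mismatch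
def pvALoop : List Char → List Char → Bool → Bool → Bool
  | [], stack, _, _ => stack.isEmpty
  | ch :: rest, stack, ins, esc =>
    let ins' := if ch = '"' ∧ esc = false then !ins else ins
    let esc' := (ch = '\\') && !esc
    if ins' then pvALoop rest stack ins' esc'
    else if ch = '{' ∨ ch = '(' ∨ ch = '[' then pvALoop rest (ch :: stack) ins' esc'
    else if ch = '}' ∨ ch = ')' ∨ ch = ']' then
      match stack with
      | [] => false
      | top :: s' => if top = pvClosesOf ch then pvALoop rest s' ins' esc' else false
    else pvALoop rest stack ins' esc'

def count_blocks (data : String) : Bool :=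
  pvALoop data.toList [] false false

-- ===== PORT B =====
def pvIsBracket (ch : Char) : Bool :=
  ch = '{' ∨ ch = '}' ∨ ch = '(' ∨ ch = ')' ∨ ch = '[' ∨ ch = ']'

def pvIsClose (ch : Char) : Bool := ch = '}' ∨ ch = ')' ∨ ch = ']'

-- Pass 1: string/escape state machine, emit only bracket characters
def pvTokens : List Char → Bool → Bool → List Char
  | [], _, _ => []
  | ch :: rest, ins, esc =>
    let ins' := if ch = '"' ∧ esc = false then !ins else ins
    let esc' := (ch = '\\') && !esc
    if !ins' && pvIsBracket ch then ch :: pvTokens rest ins' esc'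
    else pvTokens rest ins' esc'

-- Pass 2: plain stack matcher over bracket tokens
def pvMatch : List Char → List Char → Bool
  | [], stack => stack.isEmpty
  | t :: rest, stack =>
    if pvIsClose t then
      match stack with
      | [] => false
      | top :: s' => if top = pvClosesOf t then pvMatch rest s' else false
    else pvMatch rest (t :: stack)

def count_blocks_alt (data : String) : Bool :=
  pvMatch (pvTokens data.toList false false) []

-- ===== PRECONDITION & SPEC =====
def Spec_count_blocks (data : String) (out : Bool) : Prop := out = count_blocks_alt data
instance (data : String) (out : Bool) : Decidable (Spec_count_blocks data out) := by unfold Spec_count_blocks; infer_instance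

-- ===== CLAIM (what is proved, stated in full; the proofs are below) =====
def Claim_equal_count_blocks : Prop := ∀ (data : String), Dom_count_blocks data → Spec_count_blocks data (count_blocks data)

-- ===== LEMMAS AND PROOFS =====
theorem pvALoop_eq_match (cs : List Char) :
    ∀ (stack : List Char) (ins esc : Bool),
      pvALoop cs stack ins esc = pvMatch (pvTokens cs ins esc) stack := by
  induction cs with
  | nil => intro stack ins esc; simp [pvALoop, pvTokens, pvMatch]
  | cons ch rest ih =>
    intro stack ins esc
    simp only [pvALoop, pvTokens]
    generalize (if ch = '"' ∧ esc = false then !ins else ins) = ins'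
    generalize ((ch = '\\') && !esc) = esc'
    by_cases hi : ins' = true
    · simp [hi, ih]
    · simp only [Bool.not_eq_true] at hi
      simp only [hi, if_false, Bool.not_false, Bool.true_and]
      by_cases hb : pvIsBracket ch = true
      · simp only [hb, if_true]
        by_cases ho : ch = '{' ∨ ch = '(' ∨ ch = '['
        · have hc : pvIsClose ch = false := by
            rcases ho with h | h | h <;> simp [h, pvIsClose]
          simp [ho, pvMatch, hc, ih]
        · have hc : ch = '}' ∨ ch = ')' ∨ ch = ']' := by
            simp [pvIsBracket] at hb; tauto
          have hc' : pvIsClose ch = true := by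
            rcases hc with h | h | h <;> simp [h, pvIsClose]
          simp only [ho, if_false, hc, if_true, pvMatch, hc']
          cases stack with
          | nil => rfl
          | cons top s' =>
            by_cases ht : top = pvClosesOf ch <;> simp [ht, ih]
      · have ho : ¬(ch = '{' ∨ ch = '(' ∨ ch = '[') := by
            simp [pvIsBracket] at hb; tauto
        have hc : ¬(ch = '}' ∨ ch = ')' ∨ ch = ']') := by
            simp [pvIsBracket] at hb; tauto
        simp [hb, ho, hc, ih]

-- ===== VERDICT (by name: the statement is the Claim_ definition above) =====
theorem count_blocks_spec : Claim_equal_count_blocks := by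
  intro data _
  unfold Spec_count_blocks count_blocks count_blocks_alt
  exact pvALoop_eq_match _ _ _ _
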